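-- pv_equiv track=rewrite | github.com/sovan-ghosh1/SDS_PDF_Read | pdf-server-demo/pdfServer.py | clean_product_name
-- ===== SOURCE A (Python) =====
-- def clean_product_name(raw_name):
--     name = raw_name.lower().strip()
--     keywords = [
--         "application", "recommended use", "product description", "revision date",
--         "product code", "company", "prepared by", "authorization number",
--         "product id numbers", "other means of identification", "date issued",
--         "by vol", "rq", "osha", "twa", "stel", "percent", "ww identifiers"
--     ]
--     for kw in keywords:
--         if kw in name:
--             name = name.split(kw)[0].strip()
--     return name
-- ===== SOURCE B (Python) =====
-- KEYWORDS = [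
--     "application", "recommended use", "product description", "revision date",
--     "product code", "company", "prepared by", "authorization number",
--     "product id numbers", "other means of identification", "date issued",
--     "by vol", "rq", "osha", "twa", "stel", "percent", "ww identifiers"
-- ]
--
--
-- def clean_product_name(raw_name):
--     # Track a cut index into the (immutable) normalized name instead of
--     # repeatedly truncating, stripping and rescanning the string itself.
--     name = raw_name.lower().strip()
--     cut = len(name)
--     for kw in KEYWORDS:
--         i = name.find(kw, 0, cut)
--         if i != -1:
--             cut = i
--     return name[:cut].strip()
-- ===== Notes on version B (the rewrite author's own statement) =====
-- stated objective: alternative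
-- what changed: B scans the immutable normalized name with end-bounded find calls while tracking a single cut index and slices/strips once at the end, instead of A's loop that repeatedly truncates via split, strips and rescans the shrinking string.
import Mathlib
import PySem

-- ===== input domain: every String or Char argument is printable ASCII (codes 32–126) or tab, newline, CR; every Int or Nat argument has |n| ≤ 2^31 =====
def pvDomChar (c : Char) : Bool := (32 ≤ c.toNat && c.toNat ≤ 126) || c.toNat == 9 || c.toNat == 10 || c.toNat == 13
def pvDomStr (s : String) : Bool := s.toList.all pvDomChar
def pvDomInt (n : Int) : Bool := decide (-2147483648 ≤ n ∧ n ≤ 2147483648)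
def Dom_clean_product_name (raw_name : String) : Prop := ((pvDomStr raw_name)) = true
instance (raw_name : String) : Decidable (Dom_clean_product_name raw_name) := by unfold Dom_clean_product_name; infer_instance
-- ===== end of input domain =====

-- B tracks a cut index into the immutable normalized name and slices once at the
-- end, instead of A's repeated truncate-via-split/strip/rescan loop (objective: alternative).

-- the keyword list both Pythons carry
def pvKeywords : List String := [
  "application", "recommended use", "product description", "revision date",
  "product code", "company", "prepared by", "authorization number",
  "product id numbers", "other means of identification", "date issued",
  "by vol", "rq", "osha", "twa", "stel", "percent", "ww identifiers"]

-- ===== PORT A =====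
-- loop body of A: if kw in name: name = name.split(kw)[0].strip()
def pvStepA (name kw : String) : String :=
  if PySem.Str.isIn kw name then
    PySem.Str.strip ((PySem.List.pyGet? ((PySem.Str.split? name kw).getD []) 0).getD "")
  else name

def clean_product_name (raw_name : String) : String :=
  pvKeywords.foldl pvStepA (PySem.Str.strip (PySem.Str.lower raw_name))

-- ===== PORT B =====
-- loop body of B: i = name.find(kw, 0, cut); if i != -1: cut = i
def pvStepB (name : String) (cut : Int) (kw : String) : Int :=
  let i := PySem.Str.findFrom name kw 0 (some cut)
  if i ≠ -1 then i else cut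

def clean_product_name_alt (raw_name : String) : String :=
  let name := PySem.Str.strip (PySem.Str.lower raw_name)
  let cut := pvKeywords.foldl (pvStepB name) (PySem.Str.len name)
  PySem.Str.strip (PySem.Str.slice name none (some cut))

-- ===== PRECONDITION & SPEC =====
def Spec_clean_product_name (raw_name : String) (out : String) : Prop := out = clean_product_name_alt raw_name
instance (raw_name : String) (out : String) : Decidable (Spec_clean_product_name raw_name out) := by unfold Spec_clean_product_name; infer_instance

-- ===== CLAIM (what is proved, stated in full; the proofs are below) =====
def Claim_equal_clean_product_name : Prop := ∀ (raw_name : String), Dom_clean_product_name raw_name → Spec_clean_product_name raw_name (clean_product_name raw_name)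

-- ===== LEMMAS AND PROOFS =====

-- a keyword is nonempty and its last character is not whitespace (true of every pvKeywords entry)
def pvKwOk (kw : String) : Bool :=
  match kw.toList.getLast? with
  | some c => !PySem.Chars.isspace c
  | none => false

lemma pv_kwOk_spec (kw : String) (h : pvKwOk kw = true) :
    ∃ c, kw.toList.getLast? = some c ∧ PySem.Chars.isspace c = false ∧ kw.toList ≠ [] := by
  unfold pvKwOk at h
  cases hL : kw.toList.getLast? with
  | none => rw [hL] at h; simp at h
  | some c =>
      rw [hL] at h
      refine ⟨c, rfl, by simpa using h, ?_⟩
      intro hnil; rw [hnil] at hL; simp at hL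

lemma pv_drop_prefix_mono {α : Type} {l₁ l₂ : List α} (n : Nat) (h : l₁ <+: l₂) :
    l₁.drop n <+: l₂.drop n := by
  obtain ⟨r, rfl⟩ := h
  by_cases hn : n ≤ l₁.length
  · exact ⟨r.drop (n - l₁.length), by rw [List.drop_append]⟩
  · rw [List.drop_of_length_le (by omega)]
    exact List.nil_prefix

-- dropWhile: the head of the result falsifies the predicate
lemma pv_dropWhile_head {α : Type} (p : α → Bool) (l : List α) (c : α)
    (h : (l.dropWhile p).head? = some c) : p c = false := by
  have := List.head?_dropWhile_not p l
  rw [h] at this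
  exact this

lemma pv_lstrip_eq_self (s : List Char)
    (h : ∀ c, s.head? = some c → PySem.Chars.isspace c = false) :
    PySem.Chars.lstrip s = s := by
  cases s with
  | nil => rfl
  | cons a t => simp [PySem.Chars.lstrip, h a rfl]

lemma pv_rstrip_prefix (t : List Char) : PySem.Chars.rstrip t <+: t := by
  have h1 : List.dropWhile PySem.Chars.isspace t.reverse <:+ t.reverse :=
    List.dropWhile_suffix _
  have h2 := List.reverse_prefix.mpr h1
  unfold PySem.Chars.rstrip
  simpa using h2

lemma pv_good_strip (x : List Char) (c : Char)
    (h : (PySem.Chars.strip x).head? = some c) : PySem.Chars.isspace c = false := by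
  have hpre := pv_rstrip_prefix (PySem.Chars.lstrip x)
  obtain ⟨r, hr⟩ := hpre
  have hhead : (PySem.Chars.lstrip x).head? = some c := by
    rw [← hr]
    rw [List.head?_append]
    unfold PySem.Chars.strip at h
    rw [h]
    rfl
  exact pv_dropWhile_head _ _ _ hhead

lemma pv_good_take (s : List Char) (n : Nat)
    (h : ∀ c, s.head? = some c → PySem.Chars.isspace c = false) :
    ∀ c, (s.take n).head? = some c → PySem.Chars.isspace c = false := by
  intro c hc
  cases s with
  | nil => simp at hc
  | cons a t =>
      cases n with
      | zero => simp at hc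
      | succ m =>
          simp at hc
          subst hc
          exact h _ rfl

lemma pv_strip_eq_rstrip (s : List Char)
    (h : ∀ c, s.head? = some c → PySem.Chars.isspace c = false) :
    PySem.Chars.strip s = PySem.Chars.rstrip s := by
  unfold PySem.Chars.strip
  rw [pv_lstrip_eq_self s h]

lemma pv_rstrip_idem (y : List Char) :
    PySem.Chars.rstrip (PySem.Chars.rstrip y) = PySem.Chars.rstrip y := by
  unfold PySem.Chars.rstrip
  rw [List.reverse_reverse]
  congr 1
  exact pv_lstrip_eq_self _ (fun c hc => pv_dropWhile_head _ _ _ hc)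

lemma pv_strip_idem (x : List Char) :
    PySem.Chars.strip (PySem.Chars.strip x) = PySem.Chars.strip x := by
  rw [pv_strip_eq_rstrip _ (pv_good_strip x)]
  unfold PySem.Chars.strip
  exact pv_rstrip_idem _

lemma pv_suffix_dropWhile {α : Type} (p : α → Bool) (v l : List α)
    (hs : v <:+ l) (hv : ∀ c, v.head? = some c → p c = false) :
    v <:+ l.dropWhile p := by
  induction l with
  | nil => simpa using hs
  | cons a t ih =>
      rcases List.suffix_cons_iff.mp hs with h | h
      · by_cases hp : p a
        · exfalso
          have := hv a (by rw [h]; rfl)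
          rw [this] at hp; exact Bool.false_ne_true hp
        · rw [List.dropWhile_cons_of_neg hp]; exact hs
      · by_cases hp : p a
        · rw [List.dropWhile_cons_of_pos hp]; exact ih h
        · rw [List.dropWhile_cons_of_neg hp]; exact h.trans (List.suffix_cons a t)

lemma pv_prefix_rstrip (p t : List Char) (hp : p <+: t) (c : Char)
    (hl : p.getLast? = some c) (hc : PySem.Chars.isspace c = false) :
    p <+: PySem.Chars.rstrip t := by
  have hs : p.reverse <:+ t.reverse := List.reverse_suffix.mpr hp
  have h2 : p.reverse <:+ List.dropWhile PySem.Chars.isspace t.reverse := by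
    apply pv_suffix_dropWhile _ _ _ hs
    intro d hd
    rw [List.head?_reverse] at hd
    rw [hl] at hd
    injection hd with hd'
    exact hd' ▸ hc
  unfold PySem.Chars.rstrip
  have := List.reverse_prefix.mpr h2
  simpa using this

lemma pv_infix_iff_drop (sub s : List Char) :
    sub <:+: s ↔ ∃ j, sub <+: s.drop j := by
  constructor
  · intro h
    have : PySem.Chars.isIn sub s = true := (PySem.Chars.isIn_iff_infix _ _).mpr h
    exact (PySem.Chars.exists_prefix_drop_iff_isIn sub s).mpr this
  · intro h
    have : PySem.Chars.isIn sub s = true :=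
      (PySem.Chars.exists_prefix_drop_iff_isIn sub s).mp h
    exact (PySem.Chars.isIn_iff_infix _ _).mp this

lemma pv_find_eq_first (s sub : List Char) (j : Nat)
    (h1 : sub <+: s.drop j) (h2 : ∀ i, i < j → ¬ sub <+: s.drop i) :
    PySem.Chars.find s sub = (j : Int) := by
  have hin : sub <:+: s := (pv_infix_iff_drop sub s).mpr ⟨j, h1⟩
  have hnn : 0 ≤ PySem.Chars.find s sub := (PySem.Chars.find_nonneg_iff s sub).mpr hin
  obtain ⟨hocc, hmin⟩ := PySem.Chars.find_spec hnn
  have hj : (PySem.Chars.find s sub).toNat = j := by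
    by_contra hne
    rcases Nat.lt_or_ge (PySem.Chars.find s sub).toNat j with hlt | hge
    · exact h2 _ hlt hocc
    · exact hmin j (by omega) h1
  omega

lemma pv_find_rstrip (t kw : List Char) (c : Char)
    (hk : kw.getLast? = some c) (hc : PySem.Chars.isspace c = false) :
    PySem.Chars.find (PySem.Chars.rstrip t) kw = PySem.Chars.find t kw := by
  have hkne : kw ≠ [] := by intro h; rw [h] at hk; simp at hk
  by_cases hin : kw <:+: t
  · have hnn : 0 ≤ PySem.Chars.find t kw := (PySem.Chars.find_nonneg_iff t kw).mpr hin
    obtain ⟨hocc, hmin⟩ := PySem.Chars.find_spec hnn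
    set j := (PySem.Chars.find t kw).toNat with hjdef
    -- transfer the occurrence at j into rstrip t
    obtain ⟨r, hr⟩ := hocc
    have hjlen : j ≤ t.length := by
      by_contra hgt
      rw [List.drop_of_length_le (by omega)] at hr
      exact hkne (by cases kw with | nil => rfl | cons a b => simp at hr)
    have hpre : t.take j ++ kw <+: t := by
      refine ⟨r, ?_⟩
      conv_rhs => rw [← List.take_append_drop j t]
      rw [← hr, List.append_assoc]
    have hplast : (t.take j ++ kw).getLast? = some c := by
      rw [List.getLast?_append, hk]; rfl
    have hpre2 : t.take j ++ kw <+: PySem.Chars.rstrip t :=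
      pv_prefix_rstrip _ _ hpre c hplast hc
    have hocc2 : kw <+: (PySem.Chars.rstrip t).drop j := by
      obtain ⟨r', hr'⟩ := hpre2
      refine ⟨r', ?_⟩
      rw [← hr', List.append_assoc, List.drop_append_of_le_length (by
        rw [List.length_take]; omega)]
      rw [List.drop_of_length_le (by rw [List.length_take]; omega) ]
      simp
    have hmin2 : ∀ i, i < j → ¬ kw <+: (PySem.Chars.rstrip t).drop i := by
      intro i hi hcon
      exact hmin i hi (hcon.trans (pv_drop_prefix_mono i (pv_rstrip_prefix t)))
    rw [pv_find_eq_first _ _ j hocc2 hmin2]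
    omega
  · have h1 : PySem.Chars.find t kw = -1 := (PySem.Chars.find_eq_neg_one_iff t kw).mpr hin
    have h2 : PySem.Chars.find (PySem.Chars.rstrip t) kw = -1 := by
      rw [PySem.Chars.find_eq_neg_one_iff]
      intro hcon
      exact hin (hcon.trans (pv_rstrip_prefix t).isInfix)
    rw [h1, h2]

lemma pv_find_nil (sep : List Char) (h : sep ≠ []) : PySem.Chars.find [] sep = -1 := by
  rw [PySem.Chars.find_eq_neg_one_iff]
  intro hcon
  exact h (List.infix_nil.mp hcon)

lemma pv_find_cons_neg (sep : List Char) (c : Char) (rest : List Char)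
    (hnp : ¬ sep <+: (c :: rest)) (hr : PySem.Chars.find rest sep = -1) :
    PySem.Chars.find (c :: rest) sep = -1 := by
  rw [PySem.Chars.find_eq_neg_one_iff] at hr ⊢
  intro hcon
  obtain ⟨j, hj⟩ := (pv_infix_iff_drop sep _).mp hcon
  cases j with
  | zero => exact hnp (by simpa using hj)
  | succ m => exact hr ((pv_infix_iff_drop sep rest).mpr ⟨m, by simpa using hj⟩)

lemma pv_find_cons_succ (sep : List Char) (c : Char) (rest : List Char)
    (hnp : ¬ sep <+: (c :: rest)) (hr : 0 ≤ PySem.Chars.find rest sep) :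
    PySem.Chars.find (c :: rest) sep = PySem.Chars.find rest sep + 1 := by
  obtain ⟨hocc, hmin⟩ := PySem.Chars.find_spec hr
  set k := (PySem.Chars.find rest sep).toNat with hk
  have : PySem.Chars.find (c :: rest) sep = ((k + 1 : Nat) : Int) := by
    apply pv_find_eq_first
    · simpa using hocc
    · intro i hi
      cases i with
      | zero => simpa using hnp
      | succ m => intro hcon; exact hmin m (by omega) (by simpa using hcon)
  rw [this]; omega

-- the accumulator of splitOn.go is prepended reversed
lemma pv_go_acc (sep : List Char) (fuel : Nat) :
    ∀ (l cur : List Char) (acc : List (List Char)),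
      PySem.Chars.splitOn.go sep fuel l cur acc =
        acc.reverse ++ PySem.Chars.splitOn.go sep fuel l cur [] := by
  induction fuel with
  | zero => intro l cur acc; simp [PySem.Chars.splitOn.go]
  | succ n ih =>
      intro l cur acc
      cases l with
      | nil => simp [PySem.Chars.splitOn.go]
      | cons c rest =>
          by_cases hp : sep.isPrefixOf (c :: rest)
          · simp only [PySem.Chars.splitOn.go, hp, if_pos]
            rw [ih _ [] (cur.reverse :: acc), ih _ [] [cur.reverse]]
            simp
          · simp only [PySem.Chars.splitOn.go, hp]
            rw [ih rest (c :: cur) acc]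
            simp

-- the first piece of splitOn.go is cur.reverse ++ (the prefix up to the first occurrence)
lemma pv_go_head (sep : List Char) (hsep : sep ≠ []) (fuel : Nat) :
    ∀ (l cur : List Char), l.length < fuel →
      ∃ tl, PySem.Chars.splitOn.go sep fuel l cur [] =
        (cur.reverse ++ (if PySem.Chars.find l sep = -1 then l
          else l.take (PySem.Chars.find l sep).toNat)) :: tl := by
  induction fuel with
  | zero => intro l cur h; omega
  | succ n ih =>
      intro l cur hlen
      cases l with
      | nil =>
          refine ⟨[], ?_⟩
          rw [pv_find_nil sep hsep]
          simp [PySem.Chars.splitOn.go]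
      | cons c rest =>
          by_cases hp : sep.isPrefixOf (c :: rest)
          · have hpre : sep <+: (c :: rest) := List.isPrefixOf_iff_prefix.mp hp
            have hfind : PySem.Chars.find (c :: rest) sep = ((0 : Nat) : Int) := by
              apply pv_find_eq_first
              · simpa using hpre
              · intro i hi; omega
            simp only [PySem.Chars.splitOn.go, hp, if_pos]
            rw [pv_go_acc]
            refine ⟨PySem.Chars.splitOn.go sep n (List.drop sep.length (c :: rest)) [] [], ?_⟩
            rw [hfind]
            simp
          · have hnp : ¬ sep <+: (c :: rest) := fun hcon => hp (List.isPrefixOf_iff_prefix.mpr hcon)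
            simp only [PySem.Chars.splitOn.go, hp]
            obtain ⟨tl, htl⟩ := ih rest (c :: cur) (by simp at hlen; omega)
            refine ⟨tl, ?_⟩
            rw [if_neg (by simp)]
            rw [htl]
            by_cases hr : PySem.Chars.find rest sep = -1
            · rw [pv_find_cons_neg sep c rest hnp hr, hr]
              simp
            · have hnn : 0 ≤ PySem.Chars.find rest sep := by
                have := PySem.Chars.neg_one_le_find rest sep
                omega
              rw [pv_find_cons_succ sep c rest hnp hnn]
              have h1 : ¬ (PySem.Chars.find rest sep + 1 = -1) := by omega
              rw [if_neg hr, if_neg h1]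
              have h2 : ((PySem.Chars.find rest sep + 1).toNat)
                  = (PySem.Chars.find rest sep).toNat + 1 := by omega
              rw [h2, List.take_succ_cons]
              simp

lemma pv_splitOn_head (a sep : List Char) (hsep : sep ≠ []) :
    ∃ tl, PySem.Chars.splitOn a sep =
      (if PySem.Chars.find a sep = -1 then a
        else a.take (PySem.Chars.find a sep).toNat) :: tl := by
  obtain ⟨tl, htl⟩ := pv_go_head sep hsep (a.length + 1) a [] (by omega)
  exact ⟨tl, by simpa [PySem.Chars.splitOn] using htl⟩

-- findFrom with start 0 and an in-range end bound is find on the take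
lemma pv_findFrom_zero_some (s sub : List Char) (c : Int)
    (h0 : 0 ≤ c) (h1 : c ≤ s.length) :
    PySem.Chars.findFrom s sub 0 (some c) =
      (if PySem.Chars.find (s.take c.toNat) sub = -1 then -1
        else PySem.Chars.find (s.take c.toNat) sub) := by
  have hA : ¬ ((s.length : Int) < c) := by omega
  have hB : ¬ (c < 0) := by omega
  have hC : ¬ ((0:Int) < 0) := by omega
  unfold PySem.Chars.findFrom
  simp only [if_neg hA, if_neg hB, if_neg hC]
  simp

-- one loop step of A equals one loop step of B, through the invariant
lemma pv_step (nm : String)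
    (hG : ∀ c, nm.toList.head? = some c → PySem.Chars.isspace c = false)
    (kw : String) (hkw : pvKwOk kw = true) (cut : Int)
    (h0 : 0 ≤ cut) (h1 : cut ≤ nm.toList.length) :
    pvStepA (String.ofList (PySem.Chars.strip (nm.toList.take cut.toNat))) kw
      = String.ofList (PySem.Chars.strip (nm.toList.take (pvStepB nm cut kw).toNat))
    ∧ 0 ≤ pvStepB nm cut kw ∧ pvStepB nm cut kw ≤ nm.toList.length := by
  obtain ⟨c, hlast, hcsp, hkne⟩ := pv_kwOk_spec kw hkw
  set s := nm.toList with hs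
  set t := s.take cut.toNat with ht
  have hGt : ∀ d, t.head? = some d → PySem.Chars.isspace d = false := pv_good_take s _ hG
  have hstrip : PySem.Chars.strip t = PySem.Chars.rstrip t := pv_strip_eq_rstrip t hGt
  have hft : PySem.Chars.find (PySem.Chars.strip t) kw.toList = PySem.Chars.find t kw.toList := by
    rw [hstrip]; exact pv_find_rstrip t kw.toList c hlast hcsp
  set f := PySem.Chars.find t kw.toList with hf
  have hB : pvStepB nm cut kw = (if f = -1 then cut else f) := by
    unfold pvStepB
    simp only [PySem.Str.findFrom]
    rw [pv_findFrom_zero_some s kw.toList cut h0 h1]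
    rw [← ht, ← hf]
    by_cases hfe : f = -1
    · simp [hfe]
    · simp [hfe]
  by_cases hfe : f = -1
  · -- not found: both sides unchanged
    rw [hB, if_pos hfe]
    refine ⟨?_, h0, h1⟩
    unfold pvStepA
    rw [if_neg]
    simp only [PySem.Str.isIn, PySem.Chars.isIn]
    intro hcon
    rw [String.toList_ofList] at hcon
    rw [hft] at hcon
    simp [hfe] at hcon
  · -- found at f ≥ 0
    have hnn : 0 ≤ f := by
      have := PySem.Chars.neg_one_le_find t kw.toList
      rw [← hf] at this; omega
    rw [hB, if_neg hfe]
    set a := PySem.Chars.strip t with ha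
    have hfa : PySem.Chars.find a kw.toList = f := hft
    have hfle : f ≤ t.length := by
      have := PySem.Chars.find_le_length t kw.toList
      rw [← hf] at this; exact_mod_cast this
    have htlen : t.length ≤ s.length := by
      rw [ht]; simp
    refine ⟨?_, hnn, by omega⟩
    -- occurrence inside a
    have hnna : 0 ≤ PySem.Chars.find a kw.toList := by rw [hfa]; exact hnn
    obtain ⟨hocc, _⟩ := PySem.Chars.find_spec hnna
    rw [hfa] at hocc
    set j := f.toNat with hj
    have hjlt : j < a.length := by
      obtain ⟨r, hr⟩ := hocc
      by_contra hge
      rw [List.drop_of_length_le (by omega)] at hr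
      exact hkne (by cases hk : kw.toList with
        | nil => rfl
        | cons x y => rw [hk] at hr; simp at hr)
    -- a is a prefix of s
    have haps : a <+: s := by
      rw [hstrip]
      exact (pv_rstrip_prefix t).trans (List.take_prefix _ _)
    -- a.take j = s.take j
    have htake : a.take j = s.take j := by
      have hp1 : a.take j <+: s := (List.take_prefix j a).trans haps
      have hlen1 : (a.take j).length = j := by
        rw [List.length_take]; omega
      have := List.prefix_iff_eq_take.mp hp1
      rw [hlen1] at this
      exact this
    -- A side computation
    unfold pvStepA
    rw [if_pos (by
      simp only [PySem.Str.isIn, PySem.Chars.isIn]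
      rw [String.toList_ofList, hfa]
      simp [hfe])]
    obtain ⟨tl, htl⟩ := pv_splitOn_head a kw.toList hkne
    rw [if_neg (by rw [hfa]; exact hfe), hfa] at htl
    have hsplit : PySem.Str.split? (String.ofList a) kw =
        some ((String.ofList (a.take j)) :: tl.map String.ofList) := by
      simp only [PySem.Str.split?, PySem.Chars.split?]
      rw [if_neg (by simp [hkne])]
      rw [String.toList_ofList, htl]
      simp [hj]
    rw [hsplit]
    simp only [Option.getD_some]
    rw [show (PySem.List.pyGet? (String.ofList (a.take j) :: tl.map String.ofList) 0)
        = some (String.ofList (a.take j)) by simp [PySem.List.pyGet?, PySem.List.pyIdx?]]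
    simp only [Option.getD_some]
    rw [htake]
    simp [PySem.Str.strip, String.toList_ofList]

-- the whole loop preserves the invariant
lemma pv_loop (nm : String)
    (hG : ∀ c, nm.toList.head? = some c → PySem.Chars.isspace c = false) :
    ∀ (L : List String), (∀ kw ∈ L, pvKwOk kw = true) →
    ∀ (cut : Int), 0 ≤ cut → cut ≤ nm.toList.length →
    L.foldl pvStepA (String.ofList (PySem.Chars.strip (nm.toList.take cut.toNat)))
      = String.ofList (PySem.Chars.strip (nm.toList.take (L.foldl (pvStepB nm) cut).toNat))
    ∧ 0 ≤ L.foldl (pvStepB nm) cut ∧ L.foldl (pvStepB nm) cut ≤ nm.toList.length := by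
  intro L
  induction L with
  | nil => intro _ cut h0 h1; exact ⟨rfl, h0, h1⟩
  | cons kw L' ih =>
      intro hall cut h0 h1
      obtain ⟨hstep, hb0, hb1⟩ := pv_step nm hG kw (hall kw (by simp)) cut h0 h1
      simp only [List.foldl_cons]
      rw [hstep]
      exact ih (fun k hk => hall k (by simp [hk])) _ hb0 hb1

-- ===== VERDICT (by name: the statement is the Claim_ definition above) =====
theorem clean_product_name_spec : Claim_equal_clean_product_name := by
  unfold Claim_equal_clean_product_name Spec_clean_product_name
  intro raw _
  set nm := PySem.Str.strip (PySem.Str.lower raw) with hnm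
  have hGs : ∀ c, nm.toList.head? = some c → PySem.Chars.isspace c = false := by
    intro c hc
    rw [hnm] at hc
    simp only [PySem.Str.strip, String.toList_ofList] at hc
    exact pv_good_strip _ c hc
  have hnmofs : String.ofList (PySem.Chars.strip nm.toList) = nm := by
    rw [hnm]
    simp only [PySem.Str.strip, String.toList_ofList]
    rw [pv_strip_idem]
  have hall : ∀ kw ∈ pvKeywords, pvKwOk kw = true := by decide
  have hlen0 : (0 : Int) ≤ (nm.toList.length : Int) := by positivity
  obtain ⟨hmain, hb0, hb1⟩ := pv_loop nm hGs pvKeywords hall (nm.toList.length : Int)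
    hlen0 (le_refl _)
  have hinit : String.ofList (PySem.Chars.strip
      (nm.toList.take ((nm.toList.length : Int)).toNat)) = nm := by
    rw [Int.toNat_natCast, List.take_length]
    exact hnmofs
  rw [hinit] at hmain
  show clean_product_name raw = clean_product_name_alt raw
  unfold clean_product_name clean_product_name_alt
  rw [← hnm]
  simp only [PySem.Str.len]
  rw [hmain]
  simp only [PySem.Str.slice, PySem.Str.strip, String.toList_ofList,
    PySem.Chars.slice_eq_listSlice]
  rw [PySem.List.slice_to nm.toList hb0]
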